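-- pv_equiv track=rewrite | github.com/posl/comment_recommendation | script/mod_gen/4_time/zh/251_B/7.py | get_good_int
-- ===== SOURCE A (Python) =====
-- def get_good_int(N,W,A):
--     A.sort()
--     B = [0]
--     for i in range(N):
--         for j in range(i,N):
--             for k in range(j,N):
--                 B.append(A[i]+A[j]+A[k])
--     B = list(set(B))
--     B.sort()
--     C = []
--     for i in B:
--         if i <= W:
--             C.append(i)
--     return len(C)
-- ===== SOURCE B (Python) =====
-- def get_good_int(N, W, A):
--     """Count the distinct achievable sums that are at most W, where the
--     achievable sums are 0 (picking nothing) together with every sum of three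
--     elements picked with repetition from the N smallest entries of A.
--     Sorts A in place."""
--     A.sort()
--     vals = {A[i] for i in range(N)}
--     pairs = {x + y for x in vals for y in vals}
--     good = {0} | {p + z for p in pairs for z in vals}
--     return sum(1 for s in good if s <= W)
-- ===== Notes on version B (the rewrite author's own statement) =====
-- stated objective: alternative
-- what changed: Replaces the triple nested index loop that appends every ordered-index triple sum to one big list (then dedups and sorts it) with staged sumsets over the distinct values (values, pairwise sumset, triple sumset plus the empty sum 0), counting members <= W directly without the final sort; Pre_ excludes only N > len(A), where A raises IndexError.
import Mathlib
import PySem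

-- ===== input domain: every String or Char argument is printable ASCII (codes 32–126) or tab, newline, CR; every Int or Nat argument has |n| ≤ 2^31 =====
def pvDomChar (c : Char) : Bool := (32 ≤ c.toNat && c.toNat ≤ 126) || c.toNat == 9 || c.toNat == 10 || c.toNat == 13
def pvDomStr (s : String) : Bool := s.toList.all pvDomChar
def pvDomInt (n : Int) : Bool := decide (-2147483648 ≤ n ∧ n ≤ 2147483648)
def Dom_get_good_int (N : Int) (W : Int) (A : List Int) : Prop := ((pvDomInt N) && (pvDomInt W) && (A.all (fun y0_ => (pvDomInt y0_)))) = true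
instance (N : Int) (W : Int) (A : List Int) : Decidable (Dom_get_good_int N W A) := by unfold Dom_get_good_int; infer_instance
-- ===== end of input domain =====

-- B replaces A's triple nested index loop (collecting all ordered-index triple sums into one
-- list, dedup, sort, filter) with staged sumsets over the distinct values (alternative
-- decomposition, same worst-case cost); equivalence is about the RETURN value
-- (both sort A in place in Python).

-- ===== PORT A =====
-- A[i] is ported as pyGetD with default 0: exact under Pre_ (every loop index is in range).
def get_good_int (N : Int) (W : Int) (A : List Int) : Int :=
  let As := PySem.List.sorted A (fun x => x) false
  let B := (PySem.List.pyRange 0 N 1).foldl (fun acc i =>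
      (PySem.List.pyRange i N 1).foldl (fun acc j =>
        (PySem.List.pyRange j N 1).foldl (fun acc k =>
          acc ++ [PySem.List.pyGetD As i 0 + PySem.List.pyGetD As j 0 + PySem.List.pyGetD As k 0])
          acc) acc) [0]
  let B2 := PySem.List.sorted (PySem.Set.ofList B) (fun x => x) false
  let C := B2.foldl (fun acc i => if i ≤ W then acc ++ [i] else acc) ([] : List Int)
  (C.length : Int)

-- ===== PORT B =====
def get_good_int_alt (N : Int) (W : Int) (A : List Int) : Int :=
  let As := PySem.List.sorted A (fun x => x) false
  let vals := PySem.Set.ofList ((PySem.List.pyRange 0 N 1).map (fun i => PySem.List.pyGetD As i 0))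
  let pairs := PySem.Set.ofList (vals.flatMap (fun x => vals.map (fun y => x + y)))
  let good := PySem.Set.union (PySem.Set.ofList [(0 : Int)])
      (pairs.flatMap (fun p => vals.map (fun z => p + z)))
  good.foldl (fun acc s => if s ≤ W then acc + 1 else acc) (0 : Int)

-- ===== PRECONDITION & SPEC =====
-- A raises IndexError as soon as N exceeds len(A); Pre_ excludes exactly those inputs.
def Pre_get_good_int (N : Int) (W : Int) (A : List Int) : Prop := N ≤ (A.length : Int)
instance (N : Int) (W : Int) (A : List Int) : Decidable (Pre_get_good_int N W A) := by
  unfold Pre_get_good_int; infer_instance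
def pvWitness_get_good_int : Int × Int × List Int := (2, 5, [1, 2])

def Spec_get_good_int (N : Int) (W : Int) (A : List Int) (out : Int) : Prop := out = get_good_int_alt N W A
instance (N : Int) (W : Int) (A : List Int) (out : Int) : Decidable (Spec_get_good_int N W A out) := by unfold Spec_get_good_int; infer_instance

-- ===== CLAIM (what is proved, stated in full; the proofs are below) =====
def Claim_equal_get_good_int : Prop := ∀ (N : Int) (W : Int) (A : List Int), Dom_get_good_int N W A → Pre_get_good_int N W A → Spec_get_good_int N W A (get_good_int N W A)

-- ===== LEMMAS AND PROOFS =====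

theorem pv_mem_take_iff {l : List Int} {n : Nat} {a : Int} :
    a ∈ l.take n ↔ ∃ p : Nat, ∃ hp : p < l.length, p < n ∧ l[p] = a := by
  rw [List.mem_take_iff_getElem]
  constructor
  · rintro ⟨i, hi, hv⟩
    exact ⟨i, by omega, by omega, hv⟩
  · rintro ⟨p, hp, hpn, hv⟩
    exact ⟨p, by omega, hv⟩

theorem pv_sort3 {g : Int → Int} {N : Int} {p q r : Int}
    (hp : 0 ≤ p ∧ p < N) (hq : 0 ≤ q ∧ q < N) (hr : 0 ≤ r ∧ r < N) :
    ∃ i j k : Int, 0 ≤ i ∧ i ≤ j ∧ j ≤ k ∧ k < N ∧ g i + g j + g k = g p + g q + g r := by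
  rcases le_total p q with h1 | h1 <;> rcases le_total q r with h2 | h2 <;>
    rcases le_total p r with h3 | h3
  · exact ⟨p, q, r, by omega, by omega, by omega, by omega, rfl⟩
  · exact ⟨p, q, r, by omega, by omega, by omega, by omega, rfl⟩
  · exact ⟨p, r, q, by omega, by omega, by omega, by omega, by ring⟩
  · exact ⟨r, p, q, by omega, by omega, by omega, by omega, by ring⟩
  · exact ⟨q, p, r, by omega, by omega, by omega, by omega, by ring⟩
  · exact ⟨q, r, p, by omega, by omega, by omega, by omega, by ring⟩
  · exact ⟨r, p, q, by omega, by omega, by omega, by omega, by ring⟩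
  · exact ⟨r, q, p, by omega, by omega, by omega, by omega, by ring⟩

theorem pv_g_mem_take (As : List Int) (N i : Int) (hN : N ≤ (As.length : Int))
    (h1 : 0 ≤ i) (h2 : i < N) : PySem.List.pyGetD As i 0 ∈ As.take N.toNat := by
  rw [PySem.List.pyGetD_eq_getElem As 0 h1 (by omega)]
  exact pv_mem_take_iff.2 ⟨i.toNat, by omega, by omega, rfl⟩

theorem pv_core (As : List Int) (N : Int) (hN : N ≤ (As.length : Int)) (x : Int) :
    (∃ i, (0 ≤ i ∧ i < N) ∧ ∃ j, (i ≤ j ∧ j < N) ∧ ∃ k, (j ≤ k ∧ k < N) ∧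
       x = PySem.List.pyGetD As i 0 + PySem.List.pyGetD As j 0 + PySem.List.pyGetD As k 0)
    ↔ (∃ a ∈ As.take N.toNat, ∃ b ∈ As.take N.toNat, ∃ c ∈ As.take N.toNat, x = a + b + c) := by
  constructor
  · rintro ⟨i, ⟨hi0, hiN⟩, j, ⟨hij, hjN⟩, k, ⟨hjk, hkN⟩, rfl⟩
    exact ⟨_, pv_g_mem_take As N i hN hi0 hiN, _, pv_g_mem_take As N j hN (by omega) hjN,
           _, pv_g_mem_take As N k hN (by omega) hkN, rfl⟩
  · rintro ⟨a, ha, b, hb, c, hc, rfl⟩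
    obtain ⟨pa, hpa, hpan, rfl⟩ := pv_mem_take_iff.1 ha
    obtain ⟨pb, hpb, hpbn, rfl⟩ := pv_mem_take_iff.1 hb
    obtain ⟨pc, hpc, hpcn, rfl⟩ := pv_mem_take_iff.1 hc
    have ga : PySem.List.pyGetD As (pa : Int) 0 = As[pa] := by
      rw [PySem.List.pyGetD_eq_getElem As 0 (by omega) (by omega)]; simp
    have gb : PySem.List.pyGetD As (pb : Int) 0 = As[pb] := by
      rw [PySem.List.pyGetD_eq_getElem As 0 (by omega) (by omega)]; simp
    have gc : PySem.List.pyGetD As (pc : Int) 0 = As[pc] := by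
      rw [PySem.List.pyGetD_eq_getElem As 0 (by omega) (by omega)]; simp
    obtain ⟨i, j, k, hi0, hij, hjk, hkN, hsum⟩ :=
      pv_sort3 (g := fun t => PySem.List.pyGetD As t 0) (N := N) (p := (pa : Int)) (q := (pb : Int))
        (r := (pc : Int)) ⟨by omega, by omega⟩ ⟨by omega, by omega⟩ ⟨by omega, by omega⟩
    refine ⟨i, ⟨hi0, by omega⟩, j, ⟨hij, by omega⟩, k, ⟨hjk, hkN⟩, ?_⟩
    rw [hsum, ga, gb, gc]

theorem pv_count_foldl (l : List Int) (W : Int) (acc : Int) :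
    l.foldl (fun acc s => if s ≤ W then acc + 1 else acc) acc
      = acc + ((l.filter (fun s => decide (s ≤ W))).length : Int) := by
  induction l generalizing acc with
  | nil => simp
  | cons x xs ih =>
    simp only [List.foldl_cons, List.filter_cons]
    by_cases h : x ≤ W
    · simp [h, ih]; omega
    · simp [h, ih]

theorem pv_main (N W : Int) (A : List Int) (hPre : N ≤ (A.length : Int)) :
    get_good_int N W A = get_good_int_alt N W A := by
  unfold get_good_int get_good_int_alt
  simp only [PySem.List.foldl_append_singleton_eq_map, PySem.List.foldl_append_eq_flatMap,
    PySem.List.foldl_append_ite_eq_filter, List.nil_append]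
  set As := PySem.List.sorted A (fun x => x) false with hAs
  have hlen : As.length = A.length := (PySem.List.sorted_perm A _ _).length_eq
  set Bl := ([0] ++ (PySem.List.pyRange 0 N 1).flatMap (fun i =>
      (PySem.List.pyRange i N 1).flatMap (fun j =>
        (PySem.List.pyRange j N 1).map (fun k =>
          PySem.List.pyGetD As i 0 + PySem.List.pyGetD As j 0 + PySem.List.pyGetD As k 0)))) with hBl
  set vals := PySem.Set.ofList ((PySem.List.pyRange 0 N 1).map (fun i => PySem.List.pyGetD As i 0)) with hvals
  set pairs := PySem.Set.ofList (vals.flatMap (fun x => vals.map (fun y => x + y))) with hpairs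
  set good := PySem.Set.union (PySem.Set.ofList [(0 : Int)])
      (pairs.flatMap (fun p => vals.map (fun z => p + z))) with hgood
  set B2 := PySem.List.sorted (PySem.Set.ofList Bl) (fun x => x) false with hB2
  have hmemv : ∀ x : Int, x ∈ vals ↔ x ∈ As.take N.toNat := by
    intro x
    rw [hvals, PySem.Set.mem_ofList, List.mem_map]
    constructor
    · rintro ⟨i, hi, rfl⟩
      rw [PySem.List.mem_pyRange_one] at hi
      exact pv_g_mem_take As N i (by omega) hi.1 hi.2
    · intro hx
      obtain ⟨p, hp, hpn, rfl⟩ := pv_mem_take_iff.1 hx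
      refine ⟨(p : Int), PySem.List.mem_pyRange_one.2 ⟨by omega, by omega⟩, ?_⟩
      rw [PySem.List.pyGetD_eq_getElem As 0 (by omega) (by omega)]; simp
  have hmem : ∀ x : Int, x ∈ B2 ↔ x ∈ good := by
    intro x
    rw [hB2, PySem.List.mem_sorted, PySem.Set.mem_ofList, hgood, PySem.Set.mem_union,
        PySem.Set.mem_ofList, hBl]
    simp only [List.mem_append, List.mem_flatMap, List.mem_map, List.mem_singleton,
      PySem.List.mem_pyRange_one]
    have hmemp : ∀ p : Int, p ∈ pairs ↔
        ∃ a ∈ As.take N.toNat, ∃ b ∈ As.take N.toNat, p = a + b := by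
      intro p
      rw [hpairs, PySem.Set.mem_ofList]
      simp only [List.mem_flatMap, List.mem_map]
      constructor
      · rintro ⟨a, ha, b, hb, rfl⟩
        exact ⟨a, (hmemv a).1 ha, b, (hmemv b).1 hb, rfl⟩
      · rintro ⟨a, ha, b, hb, rfl⟩
        exact ⟨a, (hmemv a).2 ha, b, (hmemv b).2 hb, rfl⟩
    apply or_congr
    · simp
    · -- sums side
      constructor
      · rintro ⟨i, ⟨hi0, hiN⟩, j, ⟨hij, hjN⟩, k, ⟨hjk, hkN⟩, rfl⟩
        have := (pv_core As N (by omega) _).1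
          ⟨i, ⟨hi0, hiN⟩, j, ⟨hij, hjN⟩, k, ⟨hjk, hkN⟩, rfl⟩
        obtain ⟨a, ha, b, hb, c, hc, heq⟩ := this
        exact ⟨a + b, (hmemp _).2 ⟨a, ha, b, hb, rfl⟩, c, (hmemv c).2 hc, heq.symm⟩
      · rintro ⟨p, hp, c, hc, rfl⟩
        obtain ⟨a, ha, b, hb, rfl⟩ := (hmemp p).1 hp
        obtain ⟨i, ⟨hi0, hiN⟩, j, ⟨hij, hjN⟩, k, ⟨hjk, hkN⟩, heq⟩ :=
          (pv_core As N (by omega) (a + b + c)).2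
            ⟨a, ha, b, hb, c, (hmemv c).1 hc, rfl⟩
        exact ⟨i, ⟨hi0, hiN⟩, j, ⟨hij, hjN⟩, k, ⟨hjk, hkN⟩, heq.symm⟩
  have hnd1 : B2.Nodup := ((PySem.List.sorted_perm _ _ _).nodup_iff).2 (PySem.Set.nodup_ofList Bl)
  have hnd2 : good.Nodup := PySem.Set.nodup_union _ _ (PySem.Set.nodup_ofList _)
  have hperm : B2.Perm good := (List.perm_ext_iff_of_nodup hnd1 hnd2).2 hmem
  rw [pv_count_foldl, (hperm.filter _).length_eq]
  simp

-- ===== VERDICT =====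
theorem get_good_int_spec : Claim_equal_get_good_int := by
  intro N W A _ hPre
  unfold Pre_get_good_int at hPre
  unfold Spec_get_good_int
  exact pv_main N W A hPre
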